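-- pv_equiv track=rewrite | github.com/richardlee8433/ai-native-pm-os | promotion/report_generator.py | _aggregate_evidence
-- ===== SOURCE A (Python) =====
-- def _aggregate_evidence(evidence_items: list[dict[str, str]]) -> tuple[str, str]:
--     if not evidence_items:
--         return "inconclusive", "needs_more_validation"
--     decisions = [_classify_pack(item) for item in evidence_items]
--     if any(decision == "reject" for decision in decisions):
--         return "reject", "reject"
--     if all(decision == "positive" for decision in decisions):
--         return "provisional_lti", "provisional_lti"
--     return "inconclusive", "needs_more_validation"
--
-- def _classify_pack(evidence: dict[str, str]) -> str:
--     outcome = (evidence.get("outcome") or "").strip().lower()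
--     recommendation = (evidence.get("recommendation") or "").strip().lower()
--     if outcome in {"pass", "strong_partial"} and recommendation == "promote":
--         return "positive"
--     if outcome in {"fail"} or recommendation in {"reject", "archive"}:
--         return "reject"
--     return "inconclusive"
-- ===== SOURCE B (Python) =====
-- # Single fused pass: classification inlined via two predicates, early return on reject,
-- # one accumulator for "all positive"; no intermediate decisions list, no any/all scans.
--
-- def _field(evidence, key):
--     return (evidence.get(key) or "").strip().lower()
--
-- def _is_reject(evidence):
--     outcome = _field(evidence, "outcome")
--     recommendation = _field(evidence, "recommendation")
--     return outcome == "fail" or recommendation == "reject" or recommendation == "archive"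
--
-- def _is_positive(evidence):
--     outcome = _field(evidence, "outcome")
--     recommendation = _field(evidence, "recommendation")
--     return (outcome == "pass" or outcome == "strong_partial") and recommendation == "promote"
--
-- def _aggregate_evidence(evidence_items: list[dict[str, str]]) -> tuple[str, str]:
--     saw_any = False
--     all_positive = True
--     for evidence in evidence_items:
--         saw_any = True
--         if _is_reject(evidence):
--             return "reject", "reject"
--         all_positive = all_positive and _is_positive(evidence)
--     if saw_any and all_positive:
--         return "provisional_lti", "provisional_lti"
--     return "inconclusive", "needs_more_validation"
-- ===== Notes on version B (the rewrite author's own statement) =====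
-- stated objective: simpler
-- what changed: Replaced the decisions list plus separate any/all scans with one fused loop over the items that inlines the classification as two predicates, returns on the first reject, and keeps a single all-positive accumulator.
import Mathlib
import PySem

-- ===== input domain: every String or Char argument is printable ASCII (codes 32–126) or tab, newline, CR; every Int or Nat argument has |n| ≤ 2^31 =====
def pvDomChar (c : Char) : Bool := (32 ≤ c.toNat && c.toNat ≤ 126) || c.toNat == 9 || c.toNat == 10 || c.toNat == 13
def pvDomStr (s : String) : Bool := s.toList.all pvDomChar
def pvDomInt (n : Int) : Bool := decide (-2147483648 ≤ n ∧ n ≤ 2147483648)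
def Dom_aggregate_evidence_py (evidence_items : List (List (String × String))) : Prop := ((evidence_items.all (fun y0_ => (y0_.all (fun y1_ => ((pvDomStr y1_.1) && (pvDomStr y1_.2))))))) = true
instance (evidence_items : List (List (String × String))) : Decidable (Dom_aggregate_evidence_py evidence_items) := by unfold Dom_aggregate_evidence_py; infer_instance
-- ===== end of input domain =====

-- B fuses A's decisions list and any/all scans into one loop with an early reject return
-- and an all-positive accumulator (objective: simpler).


-- ===== PORT A =====
-- (evidence.get(k) or "").strip().lower(); 'x or ""' only replaces None/"" by "",
-- which getD "" reproduces exactly (an empty string stays empty).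
def pvField (evidence : List (String × String)) (k : String) : String :=
  PySem.Str.lower (PySem.Str.strip (((PySem.Dict.mk evidence).get? k).getD ""))

def classify_pack_py (evidence : List (String × String)) : String :=
  let outcome := pvField evidence "outcome"
  let recommendation := pvField evidence "recommendation"
  if (outcome == "pass" || outcome == "strong_partial") && recommendation == "promote" then
    "positive"
  else if outcome == "fail" || (recommendation == "reject" || recommendation == "archive") then
    "reject"
  else
    "inconclusive"

def aggregate_evidence_py (evidence_items : List (List (String × String))) : String × String :=
  if evidence_items.isEmpty then ("inconclusive", "needs_more_validation")
  else
    let decisions := evidence_items.map classify_pack_py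
    if decisions.any (fun d => d == "reject") then ("reject", "reject")
    else if decisions.all (fun d => d == "positive") then ("provisional_lti", "provisional_lti")
    else ("inconclusive", "needs_more_validation")

-- ===== PORT B =====
def is_reject_py (evidence : List (String × String)) : Bool :=
  let outcome := pvField evidence "outcome"
  let recommendation := pvField evidence "recommendation"
  outcome == "fail" || recommendation == "reject" || recommendation == "archive"

def is_positive_py (evidence : List (String × String)) : Bool :=
  let outcome := pvField evidence "outcome"
  let recommendation := pvField evidence "recommendation"
  (outcome == "pass" || outcome == "strong_partial") && recommendation == "promote"

-- the fused loop: saw_any / all_positive accumulators, early return on a reject item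
def agg_loop_py : List (List (String × String)) → Bool → Bool → String × String
  | [], saw_any, all_positive =>
      if saw_any && all_positive then ("provisional_lti", "provisional_lti")
      else ("inconclusive", "needs_more_validation")
  | evidence :: rest, _, all_positive =>
      if is_reject_py evidence then ("reject", "reject")
      else agg_loop_py rest true (all_positive && is_positive_py evidence)

def aggregate_evidence_py_alt (evidence_items : List (List (String × String))) : String × String :=
  agg_loop_py evidence_items false true

-- ===== PRECONDITION & SPEC =====
def Spec_aggregate_evidence_py (evidence_items : List (List (String × String))) (out : String × String) : Prop := out = aggregate_evidence_py_alt evidence_items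
instance (evidence_items : List (List (String × String))) (out : String × String) : Decidable (Spec_aggregate_evidence_py evidence_items out) := by unfold Spec_aggregate_evidence_py; infer_instance

-- ===== CLAIM (what is proved, stated in full; the proofs are below) =====
def Claim_equal_aggregate_evidence_py : Prop := ∀ (evidence_items : List (List (String × String))), Dom_aggregate_evidence_py evidence_items → Spec_aggregate_evidence_py evidence_items (aggregate_evidence_py evidence_items)

-- ===== LEMMAS AND PROOFS =====

-- positive is classify's first branch, so this is direct
theorem classify_positive (e : List (String × String)) :
    (classify_pack_py e == "positive") = is_positive_py e := by
  simp only [classify_pack_py, is_positive_py]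
  split_ifs with h1 h2 <;> simp_all

-- the positive and reject conditions are mutually exclusive, so classify = "reject" iff is_reject
theorem classify_reject (e : List (String × String)) :
    (classify_pack_py e == "reject") = is_reject_py e := by
  simp only [classify_pack_py, is_reject_py]
  split_ifs with h1 h2
  · -- positive branch taken: reject condition must be false
    simp only [beq_iff_eq, Bool.and_eq_true, Bool.or_eq_true] at h1
    obtain ⟨ho, hr⟩ := h1
    rcases ho with ho | ho <;> simp [ho, hr]
  · rw [← Bool.or_assoc] at h2
    rw [h2]
    rfl
  · simp only [Bool.not_eq_true] at h2
    rw [Bool.or_assoc, h2]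
    rfl

theorem agg_loop_spec (items : List (List (String × String))) :
    ∀ (saw_any all_positive : Bool),
    agg_loop_py items saw_any all_positive =
      if (items.map classify_pack_py).any (fun d => d == "reject") then ("reject", "reject")
      else if (saw_any || !items.isEmpty) && all_positive
              && (items.map classify_pack_py).all (fun d => d == "positive") then
        ("provisional_lti", "provisional_lti")
      else ("inconclusive", "needs_more_validation") := by
  induction items with
  | nil => intro saw all; simp [agg_loop_py]
  | cons e rest ih =>
    intro saw all
    simp only [agg_loop_py, List.map_cons, List.any_cons, List.all_cons,
      classify_reject, classify_positive, List.isEmpty_cons]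
    by_cases hr : is_reject_py e
    · simp [hr]
    · simp only [hr, Bool.false_or, ih]
      by_cases hrest : (rest.map classify_pack_py).any (fun d => d == "reject")
      · simp [hrest]
      · simp only [hrest]
        congr 1
        cases all <;> cases is_positive_py e <;> simp

theorem aggregate_evidence_py_spec' (evidence_items : List (List (String × String))) :
    aggregate_evidence_py evidence_items = aggregate_evidence_py_alt evidence_items := by
  unfold aggregate_evidence_py aggregate_evidence_py_alt
  rw [agg_loop_spec]
  cases evidence_items with
  | nil => simp
  | cons e rest => simp

-- ===== VERDICT (by name: the statement is the Claim_ definition above) =====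
theorem aggregate_evidence_py_spec : Claim_equal_aggregate_evidence_py := by
  intro items _
  unfold Spec_aggregate_evidence_py
  exact aggregate_evidence_py_spec' items
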